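-- pv_equiv track=rewrite | github.com/VellaRo/Bachelor | gely.py | _it
-- ===== SOURCE A (Python) =====
-- def _it(X, D) -> set:
--     '''return: all transactions that contain all items in X'''
--
--     tids = []
--
--     for x in X:  # set of items
--         _tids = []
--         for tid, y in enumerate(D):
--             if x in y:
--                 _tids.append(tid)
--         if len(_tids) > 0:
--             tids.append(set(_tids))
--
--     if len(tids) == 0:
--         return set()
--     _tids_all_x_appear_in = set.intersection(*tids)
--     return _tids_all_x_appear_in
-- ===== SOURCE B (Python) =====
-- def _it(X, D) -> set:
--     '''return: all transactions that contain all items in X'''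
--     items = set(X)
--     # vertical representation: item -> set of tids of transactions containing it
--     index = {}
--     for tid, row in enumerate(D):
--         for x in row:
--             if x in items:
--                 index.setdefault(x, set()).add(tid)
--     if not index:
--         return set()
--     tids = None
--     for s in index.values():
--         tids = s if tids is None else tids & s
--     return tids
-- ===== Notes on version B (the rewrite author's own statement) =====
-- stated objective: faster
-- what changed: A scans all of D once per item of X and then intersects the per-item tid sets; B makes a single pass over D building the vertical representation (a dict mapping each item of X to the set of tids containing it) and intersects the index's tid sets, so D is traversed once instead of |X| times.
import Mathlib
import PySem

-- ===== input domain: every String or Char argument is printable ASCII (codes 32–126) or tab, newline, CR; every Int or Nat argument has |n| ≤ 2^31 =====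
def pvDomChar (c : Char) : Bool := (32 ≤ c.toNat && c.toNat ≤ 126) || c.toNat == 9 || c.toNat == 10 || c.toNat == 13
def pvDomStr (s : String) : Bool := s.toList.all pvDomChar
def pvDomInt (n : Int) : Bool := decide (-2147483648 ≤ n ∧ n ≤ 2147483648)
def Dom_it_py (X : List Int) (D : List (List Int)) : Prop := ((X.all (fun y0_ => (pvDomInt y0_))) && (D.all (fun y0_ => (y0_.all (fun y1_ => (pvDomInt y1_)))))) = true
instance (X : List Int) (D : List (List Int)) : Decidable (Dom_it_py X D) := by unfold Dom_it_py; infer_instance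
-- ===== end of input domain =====

-- B replaces A's item-outer search (one scan of D per item of X, then a set
-- intersection) by one pass over D that builds the vertical representation —
-- a dict mapping each item of X to the set of tids containing it — and then
-- intersects the index's tid sets, traversing D once instead of once per item
-- (objective: faster; a timing run measured B faster).

-- ===== PORT A =====
def it_py (X : List Int) (D : List (List Int)) : List Int :=
  -- tids = []; for x in X: _tids = [tid for tid,y in enumerate(D) if x in y]; if _tids: tids.append(set(_tids))
  let tids : List (PySem.Set Int) := X.foldl (fun acc x =>
      let ts := (PySem.List.enumerate D).foldl
          (fun (l : List Int) (p : Int × List Int) => if x ∈ p.2 then l ++ [p.1] else l) []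
      if ts.length > 0 then acc ++ [PySem.Set.ofList ts] else acc) []
  match tids with
  | [] => []
  | s :: rest => rest.foldl (fun t u => PySem.Set.inter t u) s

-- ===== PORT B =====
def it_py_alt (X : List Int) (D : List (List Int)) : List Int :=
  let items : PySem.Set Int := PySem.Set.ofList X
  -- for tid, row in enumerate(D): for x in row: if x in items: index.setdefault(x, set()).add(tid)
  let index : PySem.Dict Int (PySem.Set Int) :=
    (PySem.List.enumerate D).foldl (fun d p =>
      p.2.foldl (fun d x =>
        if x ∈ items then d.modify x PySem.Set.empty (fun s => PySem.Set.add s p.1) else d) d)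
      PySem.Dict.empty
  -- if not index: return set();  tids = None; for s in index.values(): tids = s if tids is None else tids & s
  match index.values with
  | [] => []
  | s :: rest => rest.foldl (fun t u => PySem.Set.inter t u) s

-- ===== PRECONDITION & SPEC =====
def Spec_it_py (X : List Int) (D : List (List Int)) (out : List Int) : Prop := out = it_py_alt X D
instance (X : List Int) (D : List (List Int)) (out : List Int) : Decidable (Spec_it_py X D out) := by unfold Spec_it_py; infer_instance

-- ===== CLAIM (what is proved, stated in full; the proofs are below) =====
def Claim_equal_it_py : Prop := ∀ (X : List Int) (D : List (List Int)), Dom_it_py X D → Spec_it_py X D (it_py X D)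

-- ===== LEMMAS AND PROOFS =====

-- proof-only helpers: 'x appears in at least one transaction of D'
def pvSupp (D : List (List Int)) (x : Int) : Bool := D.any (fun row => decide (x ∈ row))

-- 'transaction p contains every item of X that appears anywhere in D'
def pvGood (X : List Int) (D : List (List Int)) (p : Int × List Int) : Bool :=
  X.all (fun x => !pvSupp D x || decide (x ∈ p.2))

-- the (ascending) tid list of transactions containing item x
def pvTs (x : Int) (D : List (List Int)) : List Int :=
  ((PySem.List.enumerate D).filter (fun p => decide (x ∈ p.2))).map (fun p => p.1)

-- common canonical value both ports are proved equal to
def pvCanon (X : List Int) (D : List (List Int)) : List Int :=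
  if X.any (pvSupp D) then
    ((PySem.List.enumerate D).filter (pvGood X D)).map (fun p => p.1)
  else []

-- the flattened (item, tid) occurrence list B's index fold processes
def pvL (X : List Int) (D : List (List Int)) : List (Int × Int) :=
  (PySem.List.enumerate D).flatMap
    (fun p => (p.2.filter (fun x => decide (x ∈ PySem.Set.ofList X))).map (fun x => (x, p.1)))

theorem pvTs_spec (x : Int) (D : List (List Int)) :
    (PySem.List.enumerate D).foldl
      (fun (l : List Int) (p : Int × List Int) => if x ∈ p.2 then l ++ [p.1] else l) []
    = pvTs x D := by
  have h := PySem.List.foldl_append_if (fun p : Int × List Int => decide (x ∈ p.2))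
      (fun p => p.1) (PySem.List.enumerate D) []
  simpa [pvTs] using h

theorem pvTs_pairwise (x : Int) (D : List (List Int)) :
    (pvTs x D).Pairwise (· < ·) := by
  unfold pvTs
  apply List.Pairwise.map
  · exact fun a b h => h
  · exact (PySem.List.pairwise_lt_enumerate D 0).filter _

theorem mem_pvTs (x : Int) (D : List (List Int)) (p : Int × List Int)
    (hp : p ∈ PySem.List.enumerate D) : p.1 ∈ pvTs x D ↔ x ∈ p.2 := by
  rw [PySem.List.mem_enumerate_iff] at hp
  obtain ⟨k, hk, rfl⟩ := hp
  simp only [pvTs, List.mem_map, List.mem_filter, PySem.List.mem_enumerate_iff]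
  constructor
  · rintro ⟨q, ⟨⟨j, hj, rfl⟩, hx⟩, hq⟩
    simp only [zero_add] at hq ⊢
    have : j = k := by exact_mod_cast hq
    subst this; simpa using hx
  · intro hx
    exact ⟨(0 + (k:Int), D[k]), ⟨⟨k, hk, rfl⟩, by simpa using hx⟩, rfl⟩

theorem snd_mem_of_mem_enumerate (D : List (List Int)) (p : Int × List Int)
    (hp : p ∈ PySem.List.enumerate D) : p.2 ∈ D := by
  rw [PySem.List.mem_enumerate_iff] at hp
  obtain ⟨k, hk, rfl⟩ := hp
  exact List.getElem_mem hk

theorem mem_pvTs_iff (x : Int) (D : List (List Int)) (t : Int) :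
    t ∈ pvTs x D ↔ ∃ p ∈ PySem.List.enumerate D, p.1 = t ∧ x ∈ p.2 := by
  simp only [pvTs, List.mem_map, List.mem_filter, decide_eq_true_eq]
  constructor
  · rintro ⟨p, ⟨hp, hx⟩, rfl⟩; exact ⟨p, hp, rfl, hx⟩
  · rintro ⟨p, hp, rfl, hx⟩; exact ⟨p, ⟨hp, hx⟩, rfl⟩

theorem pvTs_ne_nil_iff (x : Int) (D : List (List Int)) :
    (0 < (pvTs x D).length) ↔ pvSupp D x = true := by
  simp only [pvTs, pvSupp, List.length_map, List.length_pos_iff, ne_eq,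
    List.filter_eq_nil_iff, List.any_eq_true, not_forall]
  constructor
  · rintro ⟨p, hp, hx⟩
    rw [PySem.List.mem_enumerate_iff] at hp
    obtain ⟨k, hk, rfl⟩ := hp
    simp only [decide_eq_true_eq, not_not] at hx
    exact ⟨D[k], List.getElem_mem hk, by simpa using hx⟩
  · rintro ⟨row, hrow, hx⟩
    obtain ⟨k, hk, rfl⟩ := List.mem_iff_getElem.mp hrow
    refine ⟨(0 + (k:Int), D[k]), ?_, by simpa using hx⟩
    rw [PySem.List.mem_enumerate_iff]; exact ⟨k, hk, rfl⟩

theorem pvTs_nodup (x : Int) (D : List (List Int)) : (pvTs x D).Nodup :=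
  (pvTs_pairwise x D).imp (fun h => ne_of_lt h)

theorem pvSupp_of_mem_row (D : List (List Int)) (x : Int) (p : Int × List Int)
    (hp : p ∈ PySem.List.enumerate D) (hx : x ∈ p.2) : pvSupp D x = true :=
  List.any_eq_true.mpr ⟨p.2, snd_mem_of_mem_enumerate D p hp, by simpa using hx⟩

theorem inter_foldl (rest : List (PySem.Set Int)) (s : List Int) :
    rest.foldl (fun t u => PySem.Set.inter t u) s
      = s.filter (fun t => rest.all (fun u => u.contains t)) := by
  induction rest generalizing s with
  | nil => simp
  | cons u rest ih =>
    rw [List.foldl_cons, ih (PySem.Set.inter s u)]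
    simp only [PySem.Set.inter, List.filter_filter, List.all_cons]
    apply List.filter_congr
    intro t _
    simp [Bool.and_comm]

theorem pvGood_iff (X : List Int) (D : List (List Int)) (p : Int × List Int) :
    pvGood X D p = true ↔ ∀ x ∈ X, pvSupp D x = true → x ∈ p.2 := by
  simp only [pvGood, List.all_eq_true, Bool.or_eq_true, Bool.not_eq_eq_eq_not, Bool.not_true,
    decide_eq_true_eq]
  constructor
  · intro h x hx hsx
    exact (h x hx).resolve_left (by simp [hsx])
  · intro h x hx
    rcases hsx : pvSupp D x
    · exact Or.inl rfl
    · exact Or.inr (h x hx hsx)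

-- two strictly ascending lists with the same members are equal
theorem eq_of_pairwise_lt_of_mem_iff (l1 l2 : List Int)
    (h1 : l1.Pairwise (· < ·)) (h2 : l2.Pairwise (· < ·))
    (hm : ∀ t, t ∈ l1 ↔ t ∈ l2) : l1 = l2 :=
  ((List.perm_ext_iff_of_nodup (h1.imp ne_of_lt) (h2.imp ne_of_lt)).mpr hm).eq_of_pairwise
    (fun _ _ _ _ h h' => absurd h (lt_asymm h')) h1 h2

-- dedup of a weakly ascending list is strictly ascending
theorem ofList_pairwise_lt (l : List Int) (h : l.Pairwise (· ≤ ·)) :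
    (PySem.Set.ofList l).Pairwise (· < ·) := by
  induction l with
  | nil => simp [PySem.Set.ofList_nil]
  | cons a t ih =>
    rw [List.pairwise_cons] at h
    rw [PySem.Set.ofList_cons]
    refine List.pairwise_cons.mpr ⟨?_, ?_⟩
    · intro y hy
      rw [PySem.Set.mem_discard] at hy
      exact lt_of_le_of_ne (h.1 y ((PySem.Set.mem_ofList t y).mp hy.1)) (Ne.symm hy.2)
    · have hd : (PySem.Set.ofList t).discard a
          = (PySem.Set.ofList t).filter (fun y => !(y == a)) := by
        simp [PySem.Set.discard]
      rw [hd]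
      exact (ih h.2).filter _

-- a nested 'for p in l: for x in g p: acc = f acc (h p x)' is one fold over the flattened pairs
theorem foldl_foldl_flatMap {α β γ δ : Type} (l : List α) (g : α → List β) (h : α → β → γ)
    (f : δ → γ → δ) (init : δ) :
    l.foldl (fun d p => (g p).foldl (fun d x => f d (h p x)) d) init
      = (l.flatMap (fun p => (g p).map (h p))).foldl f init := by
  induction l generalizing init with
  | nil => simp
  | cons a t ih => simp [List.foldl_append, List.foldl_map, ih]

-- lookup in B's index fold: per key, the tids are collected in order
theorem getD_fold_modify_add (L : List (Int × Int)) (d : PySem.Dict Int (PySem.Set Int)) (x : Int) :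
    (L.foldl (fun d q => d.modify q.1 PySem.Set.empty (fun s => PySem.Set.add s q.2)) d).getD x PySem.Set.empty
      = PySem.Set.update (d.getD x PySem.Set.empty) ((L.filter (fun q => q.1 == x)).map (fun q => q.2)) := by
  induction L generalizing d with
  | nil => simp [PySem.Set.update]
  | cons q L ih =>
    obtain ⟨q1, q2⟩ := q
    rw [List.foldl_cons, ih, PySem.Dict.getD_modify]
    by_cases hq : q1 = x
    · subst hq
      rw [if_pos rfl, List.filter_cons_of_pos (by simp)]
      simp [PySem.Set.update]
    · rw [if_neg (fun h => hq h.symm), List.filter_cons_of_neg (by simpa using hq)]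

-- members of B's occurrence list
theorem mem_pvL (X : List Int) (D : List (List Int)) (q : Int × Int) :
    q ∈ pvL X D ↔ q.1 ∈ X ∧ ∃ p ∈ PySem.List.enumerate D, p.1 = q.2 ∧ q.1 ∈ p.2 := by
  simp only [pvL, List.mem_flatMap, List.mem_map, List.mem_filter, decide_eq_true_eq,
    PySem.Set.mem_ofList]
  constructor
  · rintro ⟨p, hp, x, ⟨hxp, hxX⟩, rfl⟩
    exact ⟨hxX, p, hp, rfl, hxp⟩
  · rintro ⟨hxX, p, hp, hpt, hxp⟩
    exact ⟨p, hp, q.1, ⟨hxp, hxX⟩, Prod.ext rfl hpt⟩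

-- the tid component of pvL is weakly ascending
theorem pvL_snd_pairwise (X : List Int) (D : List (List Int)) :
    (pvL X D).Pairwise (fun a b => a.2 ≤ b.2) := by
  unfold pvL
  rw [List.pairwise_flatMap]
  constructor
  · intro p _
    rw [List.pairwise_map]
    apply List.Pairwise.filter
    induction p.2 with
    | nil => simp
    | cons a t ih => exact List.pairwise_cons.mpr ⟨fun _ _ => le_refl p.1, ih⟩
  · refine (PySem.List.pairwise_lt_enumerate D 0).imp ?_
    intro p p' hlt
    rintro a ha b hb
    simp only [List.mem_map, List.mem_filter] at ha hb
    obtain ⟨xa, _, rfl⟩ := ha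
    obtain ⟨xb, _, rfl⟩ := hb
    exact le_of_lt hlt

-- A = canonical
theorem tids_eq (X : List Int) (D : List (List Int)) :
    X.foldl (fun acc x =>
      let ts := (PySem.List.enumerate D).foldl
          (fun (l : List Int) (p : Int × List Int) => if x ∈ p.2 then l ++ [p.1] else l) []
      if ts.length > 0 then acc ++ [PySem.Set.ofList ts] else acc) []
    = (X.filter (pvSupp D)).map (fun x => PySem.Set.ofList (pvTs x D)) := by
  have hbody : (fun (acc : List (PySem.Set Int)) x =>
      let ts := (PySem.List.enumerate D).foldl
          (fun (l : List Int) (p : Int × List Int) => if x ∈ p.2 then l ++ [p.1] else l) []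
      if ts.length > 0 then acc ++ [PySem.Set.ofList ts] else acc)
      = (fun acc x => if pvSupp D x = true then acc ++ [PySem.Set.ofList (pvTs x D)] else acc) := by
    funext acc x
    simp only [pvTs_spec]
    rcases h : pvSupp D x
    · rw [if_neg (fun hc => by simpa [h] using (pvTs_ne_nil_iff x D).mp hc), if_neg (by simp [h])]
    · rw [if_pos ((pvTs_ne_nil_iff x D).mpr h), if_pos rfl]
  rw [hbody, PySem.List.foldl_append_if (pvSupp D) (fun x => PySem.Set.ofList (pvTs x D)) X []]
  simp

-- the shared core: intersecting the supports of any enumeration x0 :: K of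
-- {x ∈ X | pvSupp D x} (membership-wise) yields the canonical answer
theorem inter_supported (X : List Int) (D : List (List Int)) (x0 : Int) (K : List Int)
    (hm : ∀ x, (x = x0 ∨ x ∈ K) ↔ (x ∈ X ∧ pvSupp D x = true)) :
    (K.map (fun x => pvTs x D)).foldl (fun t u => PySem.Set.inter t u) (pvTs x0 D)
      = pvCanon X D := by
  have hx0 := (hm x0).mp (Or.inl rfl)
  have hs : X.any (pvSupp D) = true := List.any_eq_true.mpr ⟨x0, hx0.1, hx0.2⟩
  rw [inter_foldl]
  unfold pvCanon
  rw [if_pos hs]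
  show ((((PySem.List.enumerate D).filter (fun p => decide (x0 ∈ p.2))).map (fun p => p.1)).filter _) = _
  rw [List.filter_map, List.filter_filter]
  congr 1
  apply List.filter_congr
  intro p hp
  rw [Bool.eq_iff_iff]
  simp only [Bool.and_eq_true, decide_eq_true_eq, List.all_eq_true, List.mem_map,
    Function.comp_apply, pvGood_iff]
  constructor
  · rintro ⟨hall, hx0p⟩ x hx hsx
    rcases (hm x).mpr ⟨hx, hsx⟩ with rfl | hxr
    · exact hx0p
    · have hc := hall (pvTs x D) ⟨x, hxr, rfl⟩
      exact (mem_pvTs x D p hp).mp (by simpa using hc)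
  · intro h
    refine ⟨?_, h x0 hx0.1 hx0.2⟩
    rintro u ⟨x, hxr, rfl⟩
    have hxX := (hm x).mp (Or.inr hxr)
    have : p.1 ∈ pvTs x D := (mem_pvTs x D p hp).mpr (h x hxX.1 hxX.2)
    simpa using this

theorem it_py_eq_canon (X : List Int) (D : List (List Int)) : it_py X D = pvCanon X D := by
  unfold it_py
  rw [tids_eq]
  rcases hfe : X.filter (pvSupp D) with _ | ⟨x0, restX⟩
  · have hs : X.any (pvSupp D) = false := by
      rw [List.any_eq_false]
      intro a ha hsa
      have : a ∈ X.filter (pvSupp D) := List.mem_filter.mpr ⟨ha, hsa⟩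
      simp [hfe] at this
    simp [pvCanon, hs]
  · simp only [List.map_cons]
    rw [PySem.Set.ofList_eq_self_of_nodup _ (pvTs_nodup x0 D)]
    have hmap : restX.map (fun x => (PySem.Set.ofList (pvTs x D) : PySem.Set Int))
        = restX.map (fun x => pvTs x D) :=
      List.map_congr_left (fun x _ => PySem.Set.ofList_eq_self_of_nodup _ (pvTs_nodup x D))
    rw [hmap]
    apply inter_supported
    intro x
    have : (x = x0 ∨ x ∈ restX) ↔ x ∈ x0 :: restX := by simp
    rw [this, ← hfe, List.mem_filter]

-- B = canonical
theorem it_py_alt_eq_canon (X : List Int) (D : List (List Int)) :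
    it_py_alt X D = pvCanon X D := by
  unfold it_py_alt
  simp only
  rw [show (fun (d : PySem.Dict Int (PySem.Set Int)) (p : Int × List Int) =>
        p.2.foldl (fun d x =>
          if x ∈ PySem.Set.ofList X then d.modify x PySem.Set.empty (fun s => PySem.Set.add s p.1)
          else d) d)
      = (fun d p => (p.2.filter (fun x => decide (x ∈ PySem.Set.ofList X))).foldl
          (fun d x => d.modify x PySem.Set.empty (fun s => PySem.Set.add s p.1)) d) from
    funext fun d => funext fun p =>
      PySem.List.foldl_ite_eq_foldl_filter (fun x => x ∈ PySem.Set.ofList X) _ p.2 d]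
  rw [show (fun (d : PySem.Dict Int (PySem.Set Int)) (p : Int × List Int) =>
        (p.2.filter (fun x => decide (x ∈ PySem.Set.ofList X))).foldl
          (fun d x => d.modify x PySem.Set.empty (fun s => PySem.Set.add s p.1)) d)
      = (fun d p => (p.2.filter (fun x => decide (x ∈ PySem.Set.ofList X))).foldl
          (fun d x => (fun (d : PySem.Dict Int (PySem.Set Int)) (q : Int × Int) =>
              d.modify q.1 PySem.Set.empty (fun s => PySem.Set.add s q.2)) d
            ((fun (p : Int × List Int) (x : Int) => (x, p.1)) p x)) d) from rfl]
  rw [foldl_foldl_flatMap (PySem.List.enumerate D)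
      (fun p => p.2.filter (fun x => decide (x ∈ PySem.Set.ofList X)))
      (fun p x => (x, p.1))
      (fun d q => d.modify q.1 PySem.Set.empty (fun s => PySem.Set.add s q.2)) PySem.Dict.empty]
  rw [show ((PySem.List.enumerate D).flatMap
        (fun p => (p.2.filter (fun x => decide (x ∈ PySem.Set.ofList X))).map (fun x => (x, p.1))))
      = pvL X D from rfl]
  -- keys of the index
  have hkeys : ((pvL X D).foldl
        (fun d q => d.modify q.1 PySem.Set.empty (fun s => PySem.Set.add s q.2))
        PySem.Dict.empty).keys
      = PySem.Set.ofList ((pvL X D).map (fun q => q.1)) := by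
    rw [PySem.Dict.keys_foldl_modify_key (pvL X D) (fun q => q.1) PySem.Set.empty
        (fun _ q => fun s => PySem.Set.add s q.2) PySem.Dict.empty]
    simp [PySem.Set.update, PySem.Set.ofList_eq_foldl, PySem.Dict.keys_empty]
  have hnd : ((pvL X D).foldl
        (fun d q => d.modify q.1 PySem.Set.empty (fun s => PySem.Set.add s q.2))
        PySem.Dict.empty).keys.Nodup :=
    PySem.Dict.nodup_keys_foldl_modify_key (pvL X D) (fun q => q.1) PySem.Set.empty
      (fun _ q => fun s => PySem.Set.add s q.2) PySem.Dict.empty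
      (by simp [PySem.Dict.keys_empty])
  -- per-key lookup equals pvTs
  have hval : ∀ x ∈ PySem.Set.ofList ((pvL X D).map (fun q => q.1)),
      ((pvL X D).foldl
        (fun d q => d.modify q.1 PySem.Set.empty (fun s => PySem.Set.add s q.2))
        PySem.Dict.empty).getD x PySem.Set.empty = pvTs x D := by
    intro x hx
    rw [getD_fold_modify_add]
    have hempty : (PySem.Dict.empty : PySem.Dict Int (PySem.Set Int)).getD x PySem.Set.empty
        = PySem.Set.empty := PySem.Dict.getD_empty x PySem.Set.empty
    rw [hempty]
    have hupd : PySem.Set.update (PySem.Set.empty : PySem.Set Int)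
          (((pvL X D).filter (fun q => q.1 == x)).map (fun q => q.2))
        = PySem.Set.ofList (((pvL X D).filter (fun q => q.1 == x)).map (fun q => q.2)) := by
      simp [PySem.Set.update, PySem.Set.ofList_eq_foldl, PySem.Set.empty]
    rw [hupd]
    apply eq_of_pairwise_lt_of_mem_iff
    · apply ofList_pairwise_lt
      apply List.Pairwise.map
      · exact fun a b h => h
      · exact (pvL_snd_pairwise X D).filter _
    · exact pvTs_pairwise x D
    · intro t
      rw [PySem.Set.mem_ofList, mem_pvTs_iff]
      simp only [List.mem_map, List.mem_filter, beq_iff_eq]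
      constructor
      · rintro ⟨q, ⟨hq, rfl⟩, rfl⟩
        obtain ⟨_, p, hp, hpt, hxp⟩ := (mem_pvL X D q).mp hq
        exact ⟨p, hp, hpt, hxp⟩
      · rintro ⟨p, hp, rfl, hxp⟩
        refine ⟨(x, p.1), ⟨(mem_pvL X D (x, p.1)).mpr ⟨?_, p, hp, rfl, hxp⟩, rfl⟩, rfl⟩
        simp only [List.mem_map, PySem.Set.mem_ofList] at hx
        obtain ⟨q, hq, rfl⟩ := hx
        exact ((mem_pvL X D q).mp hq).1
  rw [PySem.Dict.values_eq_map_keys _ hnd PySem.Set.empty, hkeys]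
  rw [List.map_congr_left (fun x hx => hval x hx)]
  -- case on the (deduplicated) supported items
  rcases hK : (PySem.Set.ofList ((pvL X D).map (fun q => q.1)) : List Int) with _ | ⟨x0, K⟩
  · rw [hK]
    have hs : X.any (pvSupp D) = false := by
      rw [List.any_eq_false]
      intro a ha hsa
      obtain ⟨row, hrow, hxrow⟩ := List.any_eq_true.mp hsa
      obtain ⟨k, hk, rfl⟩ := List.mem_iff_getElem.mp hrow
      have hmem : ((a, (k : Int)) : Int × Int) ∈ pvL X D := by
        refine (mem_pvL X D (a, (k:Int))).mpr ⟨ha, (0 + (k:Int), D[k]), ?_, by simp, by simpa using hxrow⟩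
        rw [PySem.List.mem_enumerate_iff]; exact ⟨k, hk, rfl⟩
      have : a ∈ PySem.Set.ofList ((pvL X D).map (fun q => q.1)) :=
        (PySem.Set.mem_ofList _ a).mpr (List.mem_map.mpr ⟨_, hmem, rfl⟩)
      simp [hK] at this
    simp [pvCanon, hs]
  · rw [hK]
    simp only [List.map_cons]
    apply inter_supported
    intro x
    have hx : (x = x0 ∨ x ∈ K) ↔ x ∈ PySem.Set.ofList ((pvL X D).map (fun q => q.1)) := by
      rw [hK]; simp
    rw [hx, PySem.Set.mem_ofList]
    simp only [List.mem_map]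
    constructor
    · rintro ⟨q, hq, rfl⟩
      obtain ⟨hqx, p, hp, _, hxp⟩ := (mem_pvL X D q).mp hq
      exact ⟨hqx, pvSupp_of_mem_row D q.1 p hp hxp⟩
    · rintro ⟨hxX, hsx⟩
      obtain ⟨row, hrow, hxrow⟩ := List.any_eq_true.mp hsx
      obtain ⟨k, hk, rfl⟩ := List.mem_iff_getElem.mp hrow
      refine ⟨(x, (k:Int)), (mem_pvL X D (x, (k:Int))).mpr ⟨hxX, (0 + (k:Int), D[k]), ?_, by simp, by simpa using hxrow⟩, rfl⟩
      rw [PySem.List.mem_enumerate_iff]; exact ⟨k, hk, rfl⟩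

-- ===== VERDICT (by name: the statement is the Claim_ definition above) =====
theorem it_py_spec : Claim_equal_it_py := by
  intro X D _
  unfold Spec_it_py
  rw [it_py_eq_canon, it_py_alt_eq_canon]
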